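-- pv_equiv track=rewrite | github.com/Lyken17/threadweaver | threadweaver_sft/data/mult_utils.py | multiply_parallel_chains
-- ===== SOURCE A (Python) =====
-- from typing import List, Tuple
--
-- def multiply_parallel_chains(numbers: List[int], parallel: bool = False, p: float = None) -> Tuple[int, str]:
--     """
--     Multiply a list of numbers with chain-of-thought reasoning.
--
--     Args:
--         numbers: List of integers to multiply
--         parallel: Whether to use parallel chain of thought style
--         p: Probability of parallelizing steps (unused in simple version)
--
--     Returns:
--         Tuple of (final_product, reasoning_text)
--     """
--     if len(numbers) == 0:
--         return 1, ""
--
--     if len(numbers) == 1: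
--         return numbers[0], f"The number is simply {numbers[0]}."
--
--     # Build chain of thought
--     lines = []
--     lines.append(f"I need to multiply: {' × '.join(map(str, numbers))}")
--
--     # Compute step by step
--     current = numbers[0]
--     steps = []
--
--     for i in range(1, len(numbers)):
--         next_num = numbers[i]
--         product = current * next_num
--
--         if parallel:
--             # Parallel style: show all intermediate steps
--             steps.append(f"Step {i}: {current} × {next_num} = {product}")
--         else:
--             # Sequential style
--             steps.append(f"{current} × {next_num} = {product}")
--
--         current = product
--
--     if parallel:
--         lines.append("I'll compute this step by step:")
--         lines.extend(steps)
--     else: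
--         lines.append("Let me multiply sequentially:")
--         lines.extend(steps)
--
--     final_product = current
--     lines.append(f"\nTherefore, the final answer is \\boxed{{{final_product}}}.")
--
--     return final_product, "\n".join(lines)
-- ===== SOURCE B (Python) =====
-- from typing import List, Tuple
--
-- def multiply_parallel_chains(numbers: List[int], parallel: bool = False, p: float = None) -> Tuple[int, str]:
--     if len(numbers) == 0:
--         return 1, ""
--     if len(numbers) == 1:
--         return numbers[0], f"The number is simply {numbers[0]}."
--     # two-pass: prefix products first, then format the steps from the triples
--     prefix = [numbers[0]]
--     for x in numbers[1:]:
--         prefix.append(prefix[-1] * x)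
--     triples = zip(prefix, numbers[1:], prefix[1:])
--     if parallel:
--         steps = [f"Step {i}: {a} × {b} = {c}" for i, (a, b, c) in enumerate(triples, start=1)]
--         intro = "I'll compute this step by step:"
--     else:
--         steps = [f"{a} × {b} = {c}" for a, b, c in triples]
--         intro = "Let me multiply sequentially:"
--     total = prefix[-1]
--     lines = [f"I need to multiply: {' × '.join(map(str, numbers))}", intro,
--              *steps, f"\nTherefore, the final answer is \\boxed{{{total}}}."]
--     return total, "\n".join(lines)
-- ===== Notes on version B (the rewrite author's own statement) =====
-- stated objective: alternative
-- what changed: A interleaves arithmetic and string formatting in one indexed loop carrying a running product; B first builds the full prefix-product list in one pass and then formats the steps in a separate pass over the zipped triples (prefix[i-1], numbers[i], prefix[i]).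
import Mathlib
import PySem

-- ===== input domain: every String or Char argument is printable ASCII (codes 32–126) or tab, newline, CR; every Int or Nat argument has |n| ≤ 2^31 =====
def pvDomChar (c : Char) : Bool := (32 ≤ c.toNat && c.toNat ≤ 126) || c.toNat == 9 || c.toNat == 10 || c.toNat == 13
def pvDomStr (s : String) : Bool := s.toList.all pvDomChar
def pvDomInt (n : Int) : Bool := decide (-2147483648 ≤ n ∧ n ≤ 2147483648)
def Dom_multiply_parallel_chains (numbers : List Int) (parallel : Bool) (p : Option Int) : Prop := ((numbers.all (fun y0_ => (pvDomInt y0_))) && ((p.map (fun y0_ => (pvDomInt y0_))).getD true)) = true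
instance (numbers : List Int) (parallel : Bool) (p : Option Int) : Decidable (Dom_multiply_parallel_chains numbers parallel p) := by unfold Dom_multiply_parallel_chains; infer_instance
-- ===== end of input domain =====

-- B recomputes nothing: one pass builds the prefix-product list, a second zips it into the
-- step strings (objective: alternative decomposition, same cost). Return values proved equal.

-- ===== PORT A =====
-- A's loop body (the body of 'for i in range(1, len(numbers))'), extracted as a named helper
def pvAStep (parallel : Bool) (numbers : List Int) (acc : Int × List String) (i : Int) : Int × List String :=
  let current := acc.1
  let next_num := PySem.List.pyGetD numbers i 0
  let product := current * next_num
  let step :=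
    if parallel then
      "Step " ++ PySem.Int.toStr i ++ ": " ++ PySem.Int.toStr current ++ " × " ++ PySem.Int.toStr next_num ++ " = " ++ PySem.Int.toStr product
    else
      PySem.Int.toStr current ++ " × " ++ PySem.Int.toStr next_num ++ " = " ++ PySem.Int.toStr product
  (product, acc.2 ++ [step])

def multiply_parallel_chains (numbers : List Int) (parallel : Bool) (p : Option Int) : Int × String :=
  if numbers.length == 0 then (1, "")
  else if numbers.length == 1 then
    (PySem.List.pyGetD numbers 0 0,
     "The number is simply " ++ PySem.Int.toStr (PySem.List.pyGetD numbers 0 0) ++ ".")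
  else
    let header := "I need to multiply: " ++ PySem.Str.join " × " (numbers.map PySem.Int.toStr)
    let st := (PySem.List.pyRange 1 (PySem.List.len numbers) 1).foldl
      (pvAStep parallel numbers) (PySem.List.pyGetD numbers 0 0, [])
    let intro := if parallel then "I'll compute this step by step:" else "Let me multiply sequentially:"
    let final_product := st.1
    (final_product,
     PySem.Str.join "\n" ([header, intro] ++ st.2 ++
       ["\nTherefore, the final answer is \\boxed{" ++ PySem.Int.toStr final_product ++ "}."]))

-- ===== PORT B =====
-- B's two step formatters (the comprehension bodies)
def pvBStepPar (it : Int × (Int × Int × Int)) : String :=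
  "Step " ++ PySem.Int.toStr it.1 ++ ": " ++ PySem.Int.toStr it.2.1 ++ " × " ++
    PySem.Int.toStr it.2.2.1 ++ " = " ++ PySem.Int.toStr it.2.2.2

def pvBStepSeq (t : Int × Int × Int) : String :=
  PySem.Int.toStr t.1 ++ " × " ++ PySem.Int.toStr t.2.1 ++ " = " ++ PySem.Int.toStr t.2.2

def multiply_parallel_chains_alt (numbers : List Int) (parallel : Bool) (p : Option Int) : Int × String :=
  if numbers.length == 0 then (1, "")
  else if numbers.length == 1 then
    (PySem.List.pyGetD numbers 0 0,
     "The number is simply " ++ PySem.Int.toStr (PySem.List.pyGetD numbers 0 0) ++ ".")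
  else
    let pref := (PySem.List.slice numbers (some 1) none).foldl
      (fun acc x => acc ++ [PySem.List.pyGetD acc (-1) 0 * x]) [PySem.List.pyGetD numbers 0 0]
    let triples := pref.zip ((PySem.List.slice numbers (some 1) none).zip (PySem.List.slice pref (some 1) none))
    let steps := if parallel then (PySem.List.enumerate triples 1).map pvBStepPar
                 else triples.map pvBStepSeq
    let intro := if parallel then "I'll compute this step by step:" else "Let me multiply sequentially:"
    let total := PySem.List.pyGetD pref (-1) 0
    (total,
     PySem.Str.join "\n" (["I need to multiply: " ++ PySem.Str.join " × " (numbers.map PySem.Int.toStr), intro] ++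
       steps ++ ["\nTherefore, the final answer is \\boxed{" ++ PySem.Int.toStr total ++ "}."]))

-- ===== PRECONDITION & SPEC =====
def Spec_multiply_parallel_chains (numbers : List Int) (parallel : Bool) (p : Option Int) (out : Int × String) : Prop := out = multiply_parallel_chains_alt numbers parallel p
instance (numbers : List Int) (parallel : Bool) (p : Option Int) (out : Int × String) : Decidable (Spec_multiply_parallel_chains numbers parallel p out) := by unfold Spec_multiply_parallel_chains; infer_instance

-- ===== CLAIM (what is proved, stated in full; the proofs are below) =====
def Claim_equal_multiply_parallel_chains : Prop := ∀ (numbers : List Int) (parallel : Bool) (p : Option Int), Dom_multiply_parallel_chains numbers parallel p → Spec_multiply_parallel_chains numbers parallel p (multiply_parallel_chains numbers parallel p)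

-- ===== LEMMAS AND PROOFS =====

-- common mathematical description of the step computation: for the tail xs, step index i, running product c
def pvLoop (parallel : Bool) (xs : List Int) (i : Int) (c : Int) : Int × List String :=
  match xs with
  | [] => (c, [])
  | y :: ys =>
      let product := c * y
      let r := pvLoop parallel ys (i + 1) product
      (r.1,
       (if parallel then
          "Step " ++ PySem.Int.toStr i ++ ": " ++ PySem.Int.toStr c ++ " × " ++ PySem.Int.toStr y ++ " = " ++ PySem.Int.toStr product
        else
          PySem.Int.toStr c ++ " × " ++ PySem.Int.toStr y ++ " = " ++ PySem.Int.toStr product) :: r.2)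

theorem pvLoop_fst (parallel : Bool) (xs : List Int) (i c : Int) :
    (pvLoop parallel xs i c).1 = xs.foldl (· * ·) c := by
  induction xs generalizing i c with
  | nil => rfl
  | cons y ys ih => simp [pvLoop, ih]

theorem pvA_loop (parallel : Bool) (xs : List Int) : ∀ (pre : List Int) (c : Int) (ss : List String),
    (PySem.List.pyRange (pre.length : Int) ((pre.length : Int) + (xs.length : Int)) 1).foldl
      (pvAStep parallel (pre ++ xs)) (c, ss)
    = ((pvLoop parallel xs (pre.length : Int) c).1, ss ++ (pvLoop parallel xs (pre.length : Int) c).2) := by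
  induction xs with
  | nil =>
    intro pre c ss
    have h0 : (pre.length : Int) + (([] : List Int).length : Int) = (pre.length : Int) := by
      simp
    rw [h0, PySem.List.pyRange_one_eq_nil le_rfl]
    simp [pvLoop]
  | cons y ys ih =>
    intro pre c ss
    rw [PySem.List.pyRange_one_cons (by push_cast [List.length_cons]; omega)]
    have hget : PySem.List.pyGetD (pre ++ y :: ys) (pre.length : Int) 0 = y := by
      simp [PySem.List.pyGetD_natCast, List.getD]
    have hpre : pre ++ y :: ys = (pre ++ [y]) ++ ys := by simp
    have hlen : (((pre ++ [y]).length : Int)) = (pre.length : Int) + 1 := by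
      simp
    simp only [List.foldl_cons, pvAStep, hget]
    rw [show ((pre.length : Int) + ((y :: ys).length : Int)) = (((pre ++ [y]).length : Int) + (ys.length : Int)) by
          rw [hlen]; push_cast [List.length_cons]; ring]
    rw [show (pre.length : Int) + 1 = (((pre ++ [y]).length : Int)) from hlen.symm]
    rw [hpre, ih (pre ++ [y]) (c * y)]
    simp [pvLoop]

theorem pvB_pref (xs : List Int) : ∀ (init : List Int) (c : Int),
    xs.foldl (fun acc x => acc ++ [PySem.List.pyGetD acc (-1) 0 * x]) (init ++ [c])
    = init ++ List.scanl (· * ·) c xs := by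
  induction xs with
  | nil => intro init c; simp [List.scanl_nil]
  | cons x xs ih =>
    intro init c
    simp only [List.foldl_cons, PySem.List.pyGetD_neg_one_append_singleton]
    rw [ih (init ++ [c]) (c * x)]
    simp [List.scanl_cons]

theorem pv_scanl_cons_tail {α : Type} (f : α → α → α) (c : α) (l : List α) :
    List.scanl f c l = c :: (List.scanl f c l).tail := by
  cases l <;> simp [List.scanl_nil, List.scanl_cons]

theorem pvB_last (xs : List Int) : ∀ (c : Int),
    PySem.List.pyGetD (List.scanl (· * ·) c xs) (-1) 0 = xs.foldl (· * ·) c := by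
  induction xs with
  | nil =>
    intro c
    have : (List.scanl (· * ·) c ([] : List Int)) = [] ++ [c] := by simp [List.scanl_nil]
    rw [this, PySem.List.pyGetD_neg_one_append_singleton]; rfl
  | cons x xs ih =>
    intro c
    rw [List.scanl_cons]
    have hne : List.scanl (· * ·) (c * x) xs ≠ [] := by
      rw [pv_scanl_cons_tail]; exact List.cons_ne_nil _ _
    rw [PySem.List.pyGetD_neg_one _ 0 (List.cons_ne_nil _ _)]
    rw [List.getLast_cons hne, ← PySem.List.pyGetD_neg_one _ 0 hne, ih]
    rfl

theorem pvB_steps_seq (xs : List Int) : ∀ (c i : Int),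
    ((List.scanl (· * ·) c xs).zip (xs.zip ((List.scanl (· * ·) c xs).tail))).map pvBStepSeq
    = (pvLoop false xs i c).2 := by
  induction xs with
  | nil => intro c i; simp [List.scanl_nil, pvLoop]
  | cons x xs ih =>
    intro c i
    rw [List.scanl_cons, pv_scanl_cons_tail (· * ·) (c * x) xs]
    simp only [List.tail_cons, List.zip_cons_cons, List.map_cons]
    rw [← pv_scanl_cons_tail (· * ·) (c * x) xs, ih (c * x) (i + 1)]
    simp [pvLoop, pvBStepSeq]

theorem pvB_steps_par (xs : List Int) : ∀ (c i : Int),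
    (PySem.List.enumerate ((List.scanl (· * ·) c xs).zip (xs.zip ((List.scanl (· * ·) c xs).tail))) i).map pvBStepPar
    = (pvLoop true xs i c).2 := by
  induction xs with
  | nil => intro c i; simp [List.scanl_nil, pvLoop, PySem.List.enumerate_nil]
  | cons x xs ih =>
    intro c i
    rw [List.scanl_cons, pv_scanl_cons_tail (· * ·) (c * x) xs]
    simp only [List.tail_cons, List.zip_cons_cons]
    rw [PySem.List.enumerate_cons, List.map_cons]
    rw [← pv_scanl_cons_tail (· * ·) (c * x) xs, ih (c * x) (i + 1)]
    simp [pvLoop, pvBStepPar]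

-- ===== VERDICT (by name: the statement is the Claim_ definition above) =====
theorem multiply_parallel_chains_spec : Claim_equal_multiply_parallel_chains := by
  intro numbers parallel p _
  show multiply_parallel_chains numbers parallel p = multiply_parallel_chains_alt numbers parallel p
  rcases numbers with _ | ⟨x, _ | ⟨y, rest⟩⟩
  · simp [multiply_parallel_chains, multiply_parallel_chains_alt]
  · simp [multiply_parallel_chains, multiply_parallel_chains_alt]
  · have hc0 : ((x :: y :: rest).length == 0) = false := by simp
    have hc1 : ((x :: y :: rest).length == 1) = false := by simp
    unfold multiply_parallel_chains multiply_parallel_chains_alt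
    rw [hc0, hc1]
    simp only [Bool.false_eq_true, if_false, PySem.List.len_eq, PySem.List.slice_from_one,
      List.tail_cons, PySem.List.pyGetD_zero_cons]
    have hA := pvA_loop parallel (y :: rest) [x] x []
    simp only [List.length_singleton, Nat.cast_one, List.singleton_append, List.nil_append] at hA
    have hpref := pvB_pref (y :: rest) [] x
    simp only [List.nil_append] at hpref
    rw [show (((x :: y :: rest).length : Int)) = 1 + (((y :: rest).length : Int)) by
          push_cast [List.length_cons]; ring]
    rw [hA, hpref, pvLoop_fst, pvB_last]
    cases parallel
    · rw [if_neg (by simp), if_neg (by simp), pvB_steps_seq (y :: rest) x 1]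
    · rw [if_pos rfl, if_pos rfl, pvB_steps_par (y :: rest) x 1]
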